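-- pv_equiv track=rewrite | github.com/SmritiVM/VPROPEL_POD | Longest ordered vowel sequence.py | check
-- ===== SOURCE A (Python) =====
-- def check(word,vowels):
--     unique = []
--     ind = 0
--     flag = True
--     for i in range(len(word)):
--         if word[i] in vowels:
--             if word[i] not in unique:
--                 unique.append(word[i])
--             ind2 = vowels.index(word[i])
--             if ind2<ind:
--                 flag = False
--                 break
--             elif ind2>ind:
--                 ind = ind2
--     if flag:
--         return len(unique)
--     else:
--         return 0
-- ===== SOURCE B (Python) =====
-- def check(word, vowels):
--     vs = [c for c in word if c in vowels]
--     idxs = [vowels.index(c) for c in vs]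
--     return len(set(vs)) if idxs == sorted(idxs) else 0
-- ===== Notes on version B (the rewrite author's own statement) =====
-- stated objective: simpler
-- what changed: Replaces the fused single-pass scan with manual unique/ind/flag bookkeeping and early break by a build-then-check decomposition: collect the vowel occurrences, test their vowel positions with idxs == sorted(idxs), and count distinct vowels with len(set(...)).
import Mathlib
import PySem

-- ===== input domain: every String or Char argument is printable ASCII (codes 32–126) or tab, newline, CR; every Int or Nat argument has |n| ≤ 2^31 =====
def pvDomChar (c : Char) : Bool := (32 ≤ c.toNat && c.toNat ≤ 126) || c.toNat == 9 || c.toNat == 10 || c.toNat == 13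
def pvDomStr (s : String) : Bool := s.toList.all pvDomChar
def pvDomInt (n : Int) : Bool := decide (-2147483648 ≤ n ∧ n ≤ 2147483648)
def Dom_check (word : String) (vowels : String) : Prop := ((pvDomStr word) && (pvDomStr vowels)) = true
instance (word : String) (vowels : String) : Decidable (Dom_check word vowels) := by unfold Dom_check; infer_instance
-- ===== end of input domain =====

-- B replaces A's fused scan with flag/ind/unique bookkeeping by a build-list, check-sorted, count-set decomposition (objective: simpler).

-- shared primitive: Python's vowels.index(c), only evaluated under the guard c ∈ vowels (so .index never raises)
def pvIdx (vw : List Char) (c : Char) : Int := (((PySem.List.index? vw c).getD 0 : Nat) : Int)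

-- ===== PORT A =====
-- A's for-loop over word with state (unique, ind) and early 'break' returning 0 ('c ∈ vw' is Python's
-- single-char substring test 'word[i] in vowels', exact for one-character strings)
def checkLoop (vw : List Char) : List Char → List Char → Int → Int
  | [], unique, _ => (unique.length : Int)
  | c :: rest, unique, ind =>
    if c ∈ vw then
      let unique' := if c ∈ unique then unique else unique ++ [c]
      let ind2 := pvIdx vw c
      if ind2 < ind then 0
      else if ind2 > ind then checkLoop vw rest unique' ind2
      else checkLoop vw rest unique' ind
    else checkLoop vw rest unique ind

def check (word : String) (vowels : String) : Int :=
  checkLoop vowels.toList word.toList [] 0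

-- ===== PORT B =====
def check_alt (word : String) (vowels : String) : Int :=
  let vw := vowels.toList
  let vs := word.toList.filter (fun c => decide (c ∈ vw))
  let idxs := vs.map (pvIdx vw)
  if idxs = PySem.List.sorted idxs (fun x => x) false then ((PySem.Set.ofList vs).length : Int) else 0

-- ===== PRECONDITION & SPEC =====
def Spec_check (word : String) (vowels : String) (out : Int) : Prop := out = check_alt word vowels
instance (word : String) (vowels : String) (out : Int) : Decidable (Spec_check word vowels out) := by unfold Spec_check; infer_instance

-- ===== CLAIM (what is proved, stated in full; the proofs are below) =====
def Claim_equal_check : Prop := ∀ (word : String) (vowels : String), Dom_check word vowels → Spec_check word vowels (check word vowels)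

-- ===== LEMMAS AND PROOFS =====

-- A's monotonicity bookkeeping, abstracted over the sequence of vowel positions
def pvMono : Int → List Int → Bool
  | _, [] => true
  | ind, x :: xs => !(decide (x < ind)) && pvMono (if x > ind then x else ind) xs

lemma checkLoop_eq (vw : List Char) : ∀ (cs unique : List Char) (ind : Int),
    checkLoop vw cs unique ind =
      if pvMono ind ((cs.filter (fun c => decide (c ∈ vw))).map (pvIdx vw))
      then (((cs.filter (fun c => decide (c ∈ vw))).foldl PySem.Set.add unique).length : Int)
      else 0 := by
  intro cs
  induction cs with
  | nil => intro unique ind; simp [checkLoop, pvMono]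
  | cons c rest ih =>
    intro unique ind
    by_cases hc : c ∈ vw
    · simp only [checkLoop, hc, if_pos, List.filter_cons, decide_eq_true_eq, List.map_cons,
        List.foldl_cons, pvMono]
      have hadd : PySem.Set.add unique c = if c ∈ unique then unique else unique ++ [c] := by
        simp [PySem.Set.add, PySem.Set.contains]
      rcases lt_trichotomy (pvIdx vw c) ind with h | h | h
      · simp [h]
      · simp [h, ih, hadd]
      · simp [h, not_lt.mpr (le_of_lt h), ih, hadd]
    · simp [checkLoop, hc, ih]

lemma pvMono_iff_chain : ∀ (xs : List Int) (ind : Int),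
    pvMono ind xs = true ↔ List.IsChain (· ≤ ·) (ind :: xs) := by
  intro xs
  induction xs with
  | nil => intro ind; simp [pvMono]
  | cons x xs ih =>
    intro ind
    by_cases h : x < ind
    · simp only [pvMono, h, decide_true, Bool.not_true, Bool.false_and,
        List.isChain_cons_cons]
      constructor
      · intro hf; exact absurd hf (by simp)
      · intro hc; omega
    · have hup : (if x > ind then x else ind) = x := by
        by_cases hgt : x > ind
        · simp [hgt]
        · simp [hgt]; omega
      simp only [pvMono, h, decide_false, Bool.not_false, Bool.true_and,
        hup, ih, List.isChain_cons_cons]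
      constructor
      · intro hc; exact ⟨not_lt.mp h, hc⟩
      · intro hc; exact hc.2

lemma sorted_eq_iff_pairwise (xs : List Int) :
    (xs = PySem.List.sorted xs (fun x => x) false) ↔ xs.Pairwise (· ≤ ·) := by
  constructor
  · intro h
    have := PySem.List.sorted_pairwise xs (fun x : Int => x) (κ := Int)
    rw [← h] at this
    exact this
  · intro h
    exact (PySem.List.sorted_eq_self_of_pairwise xs (fun x : Int => x) h).symm

theorem check_eq_alt (word vowels : String) : check word vowels = check_alt word vowels := by
  unfold check check_alt
  rw [checkLoop_eq]
  set vw := vowels.toList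
  set vs := word.toList.filter (fun c => decide (c ∈ vw)) with hvs
  set idxs := vs.map (pvIdx vw) with hidxs
  have hnn : ∀ x ∈ idxs, (0 : Int) ≤ x := by
    intro x hx
    rcases List.mem_map.mp hx with ⟨c, _, rfl⟩
    simp [pvIdx]
  have hcond : pvMono 0 idxs = true ↔ (idxs = PySem.List.sorted idxs (fun x => x) false) := by
    rw [pvMono_iff_chain, sorted_eq_iff_pairwise, List.isChain_cons]
    rw [List.isChain_iff_pairwise]
    constructor
    · intro h; exact h.2
    · intro h
      refine ⟨?_, h⟩
      intro y hy
      exact hnn y (List.mem_of_mem_head? hy)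
  have hfold : vs.foldl PySem.Set.add ([] : List Char) = PySem.Set.ofList vs := by
    rw [PySem.Set.ofList_eq_foldl]
  by_cases h : idxs = PySem.List.sorted idxs (fun x => x) false
  · rw [if_pos (hcond.mpr h), if_pos h, hfold]
  · rw [if_neg (fun hm => h (hcond.mp hm)), if_neg h]

-- ===== VERDICT (by name: the statement is the Claim_ definition above) =====
theorem check_spec : Claim_equal_check := by
  intro word vowels _
  unfold Spec_check
  exact check_eq_alt word vowels
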